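-- pv_equiv track=rewrite | github.com/ptsiampas/Exercises_Learning_Python3 | 14_List Algorithms/Exercise_14.11.5.py | prime_misses
-- ===== SOURCE A (Python) =====
-- def is_prime(n):
--     # internet's most efficient answer for finding prime :)
--     from math import sqrt
--     from itertools import count, islice
--     if n < 2:
--         return False
--     for number in islice(count(2), int(sqrt(n) - 1)):
--         if not n % number:
--             return False
--     return True
--
-- def prime_misses(tickets):
--     """
--     e. Write a function to discover whether the computer scientist has missed any prime numbers in her selection
--        of the four tickets. Return a list of all primes that she has missed
--     :param tickets: list of rows that only contains primes
--     :return: Return a list of all primes that have been missed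
--     """
--     prime_list = []
--
--     for i in range(1, 50):  # Build a list of primes
--         if is_prime(i):
--             prime_list.append(i)
--
--     for ticket in tickets:
--         for n in ticket:
--             if n in prime_list:  # remove it from the prime list
--                 prime_list.remove(n)
--
--     return prime_list
-- ===== SOURCE B (Python) =====
-- def is_prime(n):
--     # internet's most efficient answer for finding prime :)
--     from math import sqrt
--     from itertools import count, islice
--     if n < 2:
--         return False
--     for number in islice(count(2), int(sqrt(n) - 1)):
--         if not n % number:
--             return False
--     return True
--
-- def prime_misses(tickets):
--     primes = [i for i in range(1, 50) if is_prime(i)]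
--     seen = set()
--     for ticket in tickets:
--         seen.update(ticket)
--     return [p for p in primes if p not in seen]
-- ===== Notes on version B (the rewrite author's own statement) =====
-- stated objective: idiomatic
-- what changed: B replaces A's mutate-the-prime-list-while-scanning nested loop (membership test plus list.remove on the shrinking prime list per ticket number) with a gather-then-filter structure: one pass collects all ticket numbers into a set, then a comprehension keeps the primes not seen.
import Mathlib
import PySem

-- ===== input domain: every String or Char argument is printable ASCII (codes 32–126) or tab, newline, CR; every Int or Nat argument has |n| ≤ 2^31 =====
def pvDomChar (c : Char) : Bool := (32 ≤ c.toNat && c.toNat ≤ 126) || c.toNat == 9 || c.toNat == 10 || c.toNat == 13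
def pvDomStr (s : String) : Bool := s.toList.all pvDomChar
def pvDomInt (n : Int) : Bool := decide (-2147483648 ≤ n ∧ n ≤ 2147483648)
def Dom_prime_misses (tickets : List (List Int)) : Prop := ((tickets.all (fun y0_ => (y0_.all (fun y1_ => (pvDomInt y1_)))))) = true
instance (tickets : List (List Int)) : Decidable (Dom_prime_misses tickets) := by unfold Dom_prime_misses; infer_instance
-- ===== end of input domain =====

-- B replaces A's mutate-the-prime-list nested scan by gathering all ticket numbers into a set
-- once and filtering the prime list against it (objective: idiomatic gather-then-filter).

-- ===== PORT A =====
-- is_prime, shared verbatim by both Python sources.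
-- math.sqrt is a float builtin; int(sqrt(n) - 1) is ported as pvISqrt n.toNat - 1 (n ≥ 2 here),
-- exact on the 0 ≤ n ≤ 2^31 domain, where the float sqrt is accurate enough that
-- int(sqrt(n) - 1) = isqrt(n) - 1.
def pvISqrt (n : Nat) : Nat := ((List.range (n + 1)).filter (fun k => k * k ≤ n)).length - 1

def pvIsPrime (n : Int) : Bool :=
  if n < 2 then false
  else !((PySem.List.pyRange 2 (2 + ((pvISqrt n.toNat : Int) - 1)) 1).any
          (fun number => PySem.Int.mod n number == 0))

def prime_misses (tickets : List (List Int)) : List Int :=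
  let prime_list : List Int :=
    (PySem.List.pyRange 1 50 1).foldl (fun acc i => if pvIsPrime i then acc ++ [i] else acc) []
  tickets.foldl
    (fun pl ticket =>
      ticket.foldl
        (fun pl n => if pl.contains n then (PySem.List.remove? pl n).getD pl else pl)
        pl)
    prime_list

-- ===== PORT B =====
def prime_misses_alt (tickets : List (List Int)) : List Int :=
  let primes : List Int := (PySem.List.pyRange 1 50 1).filter pvIsPrime
  let seen : PySem.Set Int :=
    tickets.foldl (fun s ticket => PySem.Set.update s ticket) PySem.Set.empty
  primes.filter (fun p => !(PySem.Set.contains seen p))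

-- ===== PRECONDITION & SPEC =====
def Spec_prime_misses (tickets : List (List Int)) (out : List Int) : Prop := out = prime_misses_alt tickets
instance (tickets : List (List Int)) (out : List Int) : Decidable (Spec_prime_misses tickets out) := by unfold Spec_prime_misses; infer_instance

-- ===== CLAIM (what is proved, stated in full; the proofs are below) =====
def Claim_equal_prime_misses : Prop := ∀ (tickets : List (List Int)), Dom_prime_misses tickets → Spec_prime_misses tickets (prime_misses tickets)

-- ===== LEMMAS AND PROOFS =====

-- A's inner step: conditional first-occurrence removal.
def pvStepA (pl : List Int) (n : Int) : List Int :=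
  if pl.contains n then (PySem.List.remove? pl n).getD pl else pl

-- Folding A's step over a duplicate-free list filters out exactly the fed elements.
lemma pvFoldA_eq_filter (ns : List Int) :
    ∀ (l : List Int), l.Nodup →
      ns.foldl pvStepA l = l.filter (fun p => !(ns.contains p)) := by
  induction ns with
  | nil => intro l _; simp
  | cons n ns ih =>
    intro l hl
    simp only [List.foldl_cons]
    by_cases hn : n ∈ l
    · have hstep : pvStepA l n = l.filter (fun p => !(p == n)) := by
        unfold pvStepA
        rw [if_pos (by simpa using hn), PySem.List.remove?_eq_some_erase l n hn, Option.getD_some,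
          hl.erase_eq_filter]
        simp [bne]
      rw [hstep, ih _ (hl.filter _), List.filter_filter]
      apply List.filter_congr
      intro p _
      by_cases hpn : p = n <;> simp [hpn, Bool.and_comm]
    · have hstep : pvStepA l n = l := by
        unfold pvStepA; rw [if_neg (by simpa using hn)]
      rw [hstep, ih l hl]
      apply List.filter_congr
      intro p hp
      have hpn : p ≠ n := fun h => hn (h ▸ hp)
      simp [hpn]

-- B's seen-set fold has exactly the flattened tickets as members.
lemma pvMem_seen (tickets : List (List Int)) (p : Int) :
    p ∈ tickets.foldl (fun s ticket => PySem.Set.update s ticket) PySem.Set.empty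
      ↔ p ∈ tickets.flatten := by
  induction tickets using List.reverseRecOn with
  | nil => simp [PySem.Set.empty]
  | append_singleton ts t ih =>
    simp only [List.foldl_append, List.foldl_cons, List.foldl_nil, PySem.Set.mem_update,
      List.flatten_append, List.flatten_cons, List.flatten_nil, List.append_nil, List.mem_append]
    rw [ih]

-- ===== VERDICT (by name: the statement is the Claim_ definition above) =====
theorem prime_misses_spec : Claim_equal_prime_misses := by
  intro tickets _
  unfold Spec_prime_misses prime_misses prime_misses_alt
  have hP :
      ((PySem.List.pyRange 1 50 1).foldl (fun acc i => if pvIsPrime i then acc ++ [i] else acc) [])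
        = (PySem.List.pyRange 1 50 1).filter pvIsPrime := by decide
  rw [hP]
  have hnodup : ((PySem.List.pyRange 1 50 1).filter pvIsPrime).Nodup :=
    (PySem.List.nodup_pyRange_one 1 50).filter _
  rw [show (fun pl (ticket : List Int) =>
        ticket.foldl (fun pl n => if pl.contains n then (PySem.List.remove? pl n).getD pl else pl) pl)
      = (fun pl ticket => ticket.foldl pvStepA pl) from rfl]
  rw [← List.foldl_flatten, pvFoldA_eq_filter _ _ hnodup]
  apply List.filter_congr
  intro p _
  have hmem := pvMem_seen tickets p
  simp only [PySem.Set.contains_eq_listContains]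
  by_cases h : p ∈ tickets.flatten
  · simpa [h] using hmem.mpr h
  · simp [h]
    intro hc
    exact absurd (hmem.mp hc) h
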